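-- pv_equiv track=rewrite | github.com/MatteoLacki/MassTodonPy | Enveloper/parser.py | parse
-- ===== SOURCE A (Python) =====
-- def parse( precursor ):
-- 	revPrecursor 	= precursor[::-1]
-- 	fragments 		= [revPrecursor[0]]
-- 	prolineChunk 	= revPrecursor[0] == 'P'
-- 	for i in range( 1, len(revPrecursor)): #LGFFQQPKPR
-- 		AA = revPrecursor[i]
-- 		if  AA == 'P':
-- 			if prolineChunk:
-- 				fragments[-1] += AA
-- 			else:
-- 				fragments.append('P')
--
-- 			prolineChunk = True
-- 		else:
-- 			if prolineChunk:
-- 				fragments[-1] += AA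
-- 			else:
-- 				fragments.append(AA)
-- 			prolineChunk = False
-- 	if precursor[0] != 'P':
-- 		fragments.append('')
-- 	fragments = [ x[::-1] for x in fragments[::-1] ]
-- 	residues  = [ len(x) for x in fragments ]
-- 	return ( fragments, residues )
-- ===== SOURCE B (Python) =====
-- def parse(precursor):
--     # forward single pass: each fragment is one residue plus its run of trailing prolines
--     fragments = [] if precursor[0] == 'P' else ['']
--     i, n = 0, len(precursor)
--     while i < n:
--         j = i + 1
--         while j < n and precursor[j] == 'P':
--             j += 1
--         fragments.append(precursor[i:j])
--         i = j
--     return (fragments, [len(x) for x in fragments])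
-- ===== Notes on version B (the rewrite author's own statement) =====
-- stated objective: simpler
-- what changed: Replaces the reverse-then-state-machine loop (boolean prolineChunk flag, mutation of the last fragment, triple reversal) with a single forward two-pointer pass that slices out each residue together with its run of trailing prolines.
import Mathlib
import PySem

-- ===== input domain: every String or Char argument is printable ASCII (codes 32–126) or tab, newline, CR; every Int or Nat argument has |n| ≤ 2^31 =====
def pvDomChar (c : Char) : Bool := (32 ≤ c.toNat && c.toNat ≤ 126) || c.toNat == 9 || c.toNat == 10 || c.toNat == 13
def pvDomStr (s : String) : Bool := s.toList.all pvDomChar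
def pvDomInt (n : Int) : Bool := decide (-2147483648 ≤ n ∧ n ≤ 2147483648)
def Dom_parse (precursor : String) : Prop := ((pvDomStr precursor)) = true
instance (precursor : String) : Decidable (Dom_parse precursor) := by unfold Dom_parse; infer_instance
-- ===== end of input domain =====

-- B replaces A's reverse-then-state-machine loop with one forward grouping pass (simpler).

-- ===== PORT A =====
-- fragments[-1] += AA on the (always nonempty) fragment list: replace the last element
def parseAppendLast (frags : List (List Char)) (c : Char) : List (List Char) :=
  frags.dropLast ++ [(frags.getLast?.getD []) ++ [c]]

-- one iteration of A's for-loop over the state (fragments, prolineChunk)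
def parseAStep (st : List (List Char) × Bool) (AA : Char) : List (List Char) × Bool :=
  if AA == 'P' then
    (if st.2 then parseAppendLast st.1 AA else st.1 ++ [['P']], true)
  else
    (if st.2 then parseAppendLast st.1 AA else st.1 ++ [[AA]], false)

def parse (precursor : String) : List String × List Int :=
  let rev := precursor.toList.reverse
  match rev with
  | [] => ([], [])        -- revPrecursor[0] raises IndexError in Python here; excluded by Pre_parse
  | c :: rest =>
    let st := rest.foldl parseAStep ([[c]], c == 'P')
    -- precursor[0] != 'P' (precursor is nonempty in this branch, so head? is some)
    let frags := if precursor.toList.head?.getD ' ' ≠ 'P' then st.1 ++ [[]] else st.1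
    let frags2 := frags.reverse.map List.reverse
    (frags2.map String.ofList, frags2.map (fun x => (x.length : Int)))

-- ===== PORT B =====
-- the two while loops of Source B: one fragment = current char plus the following run of 'P'
-- (the inner while = takeWhile, the outer while advances i to j = recursion on the suffix)
def parseGroups : List Char → List (List Char)
  | [] => []
  | c :: rest =>
    (c :: rest.takeWhile (· == 'P')) :: parseGroups (rest.dropWhile (· == 'P'))
termination_by l => l.length
decreasing_by simpa using Nat.lt_succ_of_le (List.length_dropWhile_le _ _)

def parse_alt (precursor : String) : List String × List Int :=
  let s := precursor.toList
  -- precursor[0] == 'P' (Source B raises IndexError on ""; excluded by Pre_parse)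
  let fragments :=
    (if s.head?.getD ' ' == 'P' then [] else [([] : List Char)]) ++ parseGroups s
  (fragments.map String.ofList, fragments.map (fun x => (x.length : Int)))

-- ===== PRECONDITION & SPEC =====
-- Both A and B evaluate precursor[0], raising IndexError on the empty string
def Pre_parse (precursor : String) : Prop := precursor ≠ ""
instance (precursor : String) : Decidable (Pre_parse precursor) := by unfold Pre_parse; infer_instance
def pvWitness_parse : String := "LGFFQQPKPR"

def Spec_parse (precursor : String) (out : List String × List Int) : Prop := out = parse_alt precursor
instance (precursor : String) (out : List String × List Int) : Decidable (Spec_parse precursor out) := by unfold Spec_parse; infer_instance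

-- ===== CLAIM (what is proved, stated in full; the proofs are below) =====
def Claim_equal_parse : Prop := ∀ (precursor : String), Dom_parse precursor → Pre_parse precursor → Spec_parse precursor (parse precursor)

-- ===== LEMMAS AND PROOFS =====

-- a fragment list as A stores it: reverse the list and each fragment
def revmap (X : List (List Char)) : List (List Char) := X.reverse.map List.reverse

theorem revmap_cons (g : List Char) (gs : List (List Char)) :
    revmap (g :: gs) = revmap gs ++ [g.reverse] := by
  simp [revmap]

theorem parseAppendLast_revmap (c : Char) (g : List Char) (gs : List (List Char)) :
    parseAppendLast (revmap (g :: gs)) c = revmap ((c :: g) :: gs) := by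
  simp [parseAppendLast, revmap_cons]

theorem parseGroups_cons (c : Char) (rest : List Char) :
    parseGroups (c :: rest)
      = (c :: rest.takeWhile (· == 'P')) :: parseGroups (rest.dropWhile (· == 'P')) := by
  rw [parseGroups]

-- loop invariant: folding A's step over r.reverse yields exactly B's groups of r ++ [c0]
-- (in reversed form) together with the flag "head of r ++ [c0] is 'P'"
theorem parse_key (r : List Char) (c0 : Char) :
    List.foldl parseAStep ([[c0]], c0 == 'P') r.reverse
      = (revmap (parseGroups (r ++ [c0])), (r ++ [c0]).headI == 'P') := by
  induction r with
  | nil =>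
      simp [parseGroups_cons, parseGroups, revmap, List.headI]
  | cons c r' ih =>
      have hfold : (c :: r').reverse = r'.reverse ++ [c] := by simp
      rw [hfold, List.foldl_append, ih]
      obtain ⟨d, t', hl'⟩ : ∃ d t', r' ++ [c0] = d :: t' := by
        cases r' with
        | nil => exact ⟨c0, [], rfl⟩
        | cons a b => exact ⟨a, b ++ [c0], rfl⟩
      rw [List.cons_append, hl']
      by_cases hd : d = 'P'
      · subst hd
        -- prolineChunk is true: A glues the next char onto the last fragment
        rw [parseGroups_cons, parseGroups_cons (c := c)]
        simp only [List.takeWhile, List.dropWhile, List.headI]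
        by_cases hc : c = 'P' <;>
          simp [parseAStep, hc, parseAppendLast_revmap]
      · -- prolineChunk is false: A starts a fresh fragment
        have hdb : (d == 'P') = false := by simpa using hd
        rw [parseGroups_cons (c := c)]
        simp only [List.takeWhile, List.dropWhile, List.headI, hdb]
        by_cases hc : c = 'P' <;>
          simp [parseAStep, hc, parseGroups_cons, revmap_cons]

theorem parse_eq_alt (precursor : String) (h : precursor ≠ "") :
    parse precursor = parse_alt precursor := by
  have hne : precursor.toList ≠ [] := by
    simp only [ne_eq, String.toList_eq_nil_iff]; exact h
  rcases hrev : precursor.toList.reverse with _ | ⟨c, rest⟩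
  · exact absurd (by simpa using congrArg List.reverse hrev) hne
  · have hl : precursor.toList = rest.reverse ++ [c] := by
      have := congrArg List.reverse hrev
      simpa using this
    have hk := parse_key rest.reverse c
    rw [List.reverse_reverse] at hk
    rw [parse, parse_alt]
    simp only [hl, List.reverse_append, List.reverse_reverse, List.reverse_cons,
      List.reverse_nil, List.nil_append, List.singleton_append]
    rw [hk]
    have hHead : (rest.reverse ++ [c]).head?.getD ' ' = (rest.reverse ++ [c]).headI := by
      cases rest.reverse <;> simp [List.headI]
    rw [hHead]
    by_cases hp : (rest.reverse ++ [c]).headI = 'P'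
    · rw [if_neg (not_not_intro hp)]
      simp [hp, revmap, List.map_reverse]
    · rw [if_pos hp]
      have hb : ((rest.reverse ++ [c]).headI == 'P') = false := by simpa using hp
      rw [hb]
      simp [revmap, List.map_reverse]

-- ===== VERDICT (by name: the statement is the Claim_ definition above) =====
theorem parse_spec : Claim_equal_parse := by
  intro precursor _ hpre
  exact parse_eq_alt precursor hpre
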